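-- pv_equiv track=rewrite | github.com/Augment-Decompiler/ALIEN | alien_plugin.py | get_overlap_idx
-- ===== SOURCE A (Python) =====
-- def get_overlap_idx(lists, range_info):
--     if(len(lists) == 0):
--         return 0
--
--     '''
--     assumed that lists[0][0] <= lists[0][1] <= lists[1][0] <= lists[1][1] <= ...
--     we can use bsearch
--     '''
--
--     left = 0
--     right = len(lists) - 1
--
--     while(left <= right):
--         middle = left + (right - left) // 2
--         if(lists[middle][1] == (range_info[0] - 1) or (range_info[1] + 1) == lists[middle][0]):
--             return middle
--         elif(range_info[0] > lists[middle][1]):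
--             left = middle + 1
--         else:
--             right = middle - 1
--
--     return left
-- ===== SOURCE B (Python) =====
-- def get_overlap_idx(lists, range_info):
--     if len(lists) == 0:
--         return 0
--
--     def go(left, right):
--         if left > right:
--             return left
--         middle = left + (right - left) // 2
--         if lists[middle][1] == range_info[0] - 1 or range_info[1] + 1 == lists[middle][0]:
--             return middle
--         if range_info[0] > lists[middle][1]:
--             return go(middle + 1, right)
--         return go(left, middle - 1)
--
--     return go(0, len(lists) - 1)
-- ===== Notes on version B (the rewrite author's own statement) =====
-- stated objective: alternative
-- what changed: The iterative while-loop binary search with mutable left/right state is re-decomposed as a recursive divide-and-conquer helper over bounds (left, right) with base case left > right returning the insertion point.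
import Mathlib
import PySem

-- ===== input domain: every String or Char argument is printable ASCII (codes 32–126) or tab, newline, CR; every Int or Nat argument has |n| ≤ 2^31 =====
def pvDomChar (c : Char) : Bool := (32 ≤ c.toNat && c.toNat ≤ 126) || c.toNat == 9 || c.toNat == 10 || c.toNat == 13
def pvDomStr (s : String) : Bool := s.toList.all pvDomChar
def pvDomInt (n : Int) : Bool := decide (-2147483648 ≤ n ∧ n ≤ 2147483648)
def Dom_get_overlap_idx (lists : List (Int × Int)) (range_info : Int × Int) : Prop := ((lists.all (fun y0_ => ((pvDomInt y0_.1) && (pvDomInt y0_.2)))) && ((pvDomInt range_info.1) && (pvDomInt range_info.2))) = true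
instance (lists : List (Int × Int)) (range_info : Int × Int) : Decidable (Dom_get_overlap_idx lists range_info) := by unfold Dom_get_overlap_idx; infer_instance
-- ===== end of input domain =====

-- ===== PORT A =====
-- B rewrites A's iterative while-loop binary search as a recursive helper over bounds (alternative decomposition; same cost).
-- Port of A: the while-loop becomes a fuel-indexed loop over the same (left, right) state;
-- fuel = len(lists) + 1 strictly exceeds the number of iterations (the gap right - left + 1
-- starts at len(lists) and strictly decreases each iteration), so the fuel-0 branch is unreachable.
def pvLoopA (lists : List (Int × Int)) (r : Int × Int) : Nat → Int → Int → Int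
  | 0, left, _ => left
  | fuel + 1, left, right =>
    if left ≤ right then
      let middle := left + PySem.Int.floordiv (right - left) 2
      let p := (PySem.List.pyGet? lists middle).getD (0, 0)
      if p.2 = r.1 - 1 ∨ r.2 + 1 = p.1 then middle
      else if r.1 > p.2 then pvLoopA lists r fuel (middle + 1) right
      else pvLoopA lists r fuel left (middle - 1)
    else left

def get_overlap_idx (lists : List (Int × Int)) (range_info : Int × Int) : Int :=
  if lists.length = 0 then 0
  else pvLoopA lists range_info (lists.length + 1) 0 ((lists.length : Int) - 1)

-- ===== PORT B =====
-- midpoint bounds used by the recursion's termination proof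
theorem pvHalf_bounds (n : Int) (h : 0 ≤ n) : 0 ≤ PySem.Int.floordiv n 2 ∧ PySem.Int.floordiv n 2 ≤ n := by
  rw [PySem.Int.floordiv_eq_ediv_of_pos (by omega)]
  omega

def pvGoB (lists : List (Int × Int)) (r : Int × Int) (left right : Int) : Int :=
  if hlr : left > right then left
  else
    let middle := left + PySem.Int.floordiv (right - left) 2
    let p := (PySem.List.pyGet? lists middle).getD (0, 0)
    if p.2 = r.1 - 1 ∨ r.2 + 1 = p.1 then middle
    else if r.1 > p.2 then pvGoB lists r (middle + 1) right
    else pvGoB lists r left (middle - 1)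
termination_by (right - left + 1).toNat
decreasing_by
  · have := pvHalf_bounds (right - left) (by omega)
    omega
  · have := pvHalf_bounds (right - left) (by omega)
    omega

def get_overlap_idx_alt (lists : List (Int × Int)) (range_info : Int × Int) : Int :=
  if lists.length = 0 then 0
  else pvGoB lists range_info 0 ((lists.length : Int) - 1)

-- ===== PRECONDITION & SPEC =====
def Spec_get_overlap_idx (lists : List (Int × Int)) (range_info : Int × Int) (out : Int) : Prop := out = get_overlap_idx_alt lists range_info
instance (lists : List (Int × Int)) (range_info : Int × Int) (out : Int) : Decidable (Spec_get_overlap_idx lists range_info out) := by unfold Spec_get_overlap_idx; infer_instance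

-- ===== CLAIM (what is proved, stated in full; the proofs are below) =====
def Claim_equal_get_overlap_idx : Prop := ∀ (lists : List (Int × Int)) (range_info : Int × Int), Dom_get_overlap_idx lists range_info → Spec_get_overlap_idx lists range_info (get_overlap_idx lists range_info)

-- ===== LEMMAS AND PROOFS =====

-- ===== VERDICT (by name: the statement is the Claim_ definition above) =====
theorem pvLoop_eq_go (lists : List (Int × Int)) (r : Int × Int) :
    ∀ (fuel : Nat) (left right : Int), (right - left + 1).toNat < fuel →
      pvLoopA lists r fuel left right = pvGoB lists r left right := by
  intro fuel
  induction fuel with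
  | zero => intro left right h; omega
  | succ fuel ih =>
    intro left right h
    rw [pvGoB]
    simp only [pvLoopA]
    by_cases hlr : left ≤ right
    · have hm := pvHalf_bounds (right - left) (by omega)
      simp only [hlr, if_pos, gt_iff_lt, not_lt.mpr hlr, dif_neg, not_false_iff]
      split
      · rfl
      · split
        · exact ih _ _ (by omega)
        · exact ih _ _ (by omega)
    · simp [hlr, show left > right by omega]

theorem get_overlap_idx_spec : Claim_equal_get_overlap_idx := by
  intro lists range_info _
  unfold Spec_get_overlap_idx get_overlap_idx get_overlap_idx_alt
  by_cases h : lists.length = 0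
  · simp [h]
  · simp only [h, if_neg, not_false_iff]
    exact pvLoop_eq_go lists range_info _ 0 _ (by omega)
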